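-- pv_equiv track=rewrite | github.com/jundahuang9123/bioinformatics-algorithms | hidden_markov_model.py | match_emissions
-- ===== SOURCE A (Python) =====
-- pa = { 'A':0.074, 'C':0.025, 'D':0.054, 'E':0.054, 'F':0.047, 'G':0.074,\
--     'H':0.026, 'I':0.068, 'L':0.099, 'K':0.058, 'M':0.025, 'N':0.045,\
--     'P':0.039, 'Q':0.034, 'R':0.052, 'S':0.057, 'T':0.051, 'V':0.073,\
--     'W':0.013, 'Y':0.034 }
--
-- def match_emissions(seqdict, match_pos):
--     """
--     find all residues that are emitted in match states
--
--     input: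
--         seqdict: (dictionary) dictionary with sequences as value
--             title as key. e.g. seqdict = {>HBA_HUMAN: VFA--HAGEY}
--         match_pos: (list)  of int of match states positions in the sequneces
--     outpus:
--         emissions_m: (list) of list of emitted residues in position order
--     """
--     emissions_m = []
--     for i, seq in enumerate(seqdict.values()):
--         for j, pos in enumerate(match_pos):
--             if i == 0 :
--                 emissions_m.append([])
--             if seq[pos] in pa.keys():
--                 emissions_m[j].append(seq[pos])
--     return emissions_m
-- ===== SOURCE B (Python) =====
-- pa = { 'A':0.074, 'C':0.025, 'D':0.054, 'E':0.054, 'F':0.047, 'G':0.074,\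
--     'H':0.026, 'I':0.068, 'L':0.099, 'K':0.058, 'M':0.025, 'N':0.045,\
--     'P':0.039, 'Q':0.034, 'R':0.052, 'S':0.057, 'T':0.051, 'V':0.073,\
--     'W':0.013, 'Y':0.034 }
--
-- def _columns(seqs, match_pos):
--     # divide and conquer: a column over seqs is the column over the first half
--     # concatenated with the column over the second half
--     if not seqs:
--         return [[] for _ in match_pos]
--     if len(seqs) == 1:
--         s = seqs[0]
--         return [[s[p]] if s[p] in pa else [] for p in match_pos]
--     mid = len(seqs) // 2
--     left = _columns(seqs[:mid], match_pos)
--     right = _columns(seqs[mid:], match_pos)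
--     return [l + r for l, r in zip(left, right)]
--
-- def match_emissions(seqdict, match_pos):
--     if not seqdict:
--         return []
--     return _columns(list(seqdict.values()), match_pos)
-- ===== Notes on version B (the rewrite author's own statement) =====
-- stated objective: alternative
-- what changed: B builds the columns by divide and conquer on the sequence list (column over all sequences = column over first half ++ column over second half), replacing A's sequence-major mutation with lazy column initialization and append-at-index.
import Mathlib
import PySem

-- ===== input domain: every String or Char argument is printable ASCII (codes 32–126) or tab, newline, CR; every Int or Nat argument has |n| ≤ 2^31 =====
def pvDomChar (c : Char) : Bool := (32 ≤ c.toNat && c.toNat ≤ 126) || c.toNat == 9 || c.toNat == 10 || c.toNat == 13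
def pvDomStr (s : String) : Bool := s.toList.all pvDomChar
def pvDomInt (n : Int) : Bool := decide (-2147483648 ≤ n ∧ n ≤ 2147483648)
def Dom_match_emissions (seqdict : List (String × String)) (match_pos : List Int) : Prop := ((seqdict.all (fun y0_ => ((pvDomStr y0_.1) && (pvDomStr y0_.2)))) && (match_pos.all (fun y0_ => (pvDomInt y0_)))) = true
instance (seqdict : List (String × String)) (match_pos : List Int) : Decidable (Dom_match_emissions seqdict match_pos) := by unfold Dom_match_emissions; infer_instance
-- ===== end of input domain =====

-- B replaces A's sequence-major mutation (lazy column init + append at index j) by a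
-- divide-and-conquer on the sequence list: each column over all sequences is the column
-- over the first half concatenated with the column over the second half.

-- keys of the module constant `pa` (only membership in pa.keys() matters)
def paChars : List Char :=
  ['A','C','D','E','F','G','H','I','L','K','M','N','P','Q','R','S','T','V','W','Y']

-- ===== PORT A =====
def match_emissions (seqdict : List (String × String)) (match_pos : List Int) : List (List String) :=
  (PySem.List.enumerate (seqdict.map (·.2))).foldl (fun em iseq =>
    (PySem.List.enumerate match_pos).foldl (fun em jpos =>
      let em := if iseq.1 = (0 : Int) then em ++ [[]] else em
      match PySem.Str.pyGet? iseq.2 jpos.2 with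
      | some c =>
          if paChars.contains c then
            PySem.List.pySetD em jpos.1 (PySem.List.pyGetD em jpos.1 [] ++ [String.ofList [c]])
          else em
      | none => em) em) []

-- ===== PORT B =====
-- the head's contribution to one column: [s[p]] if s[p] in pa else []
-- (pyGet? = none, i.e. Python IndexError, is excluded by Pre_; the port yields [] there)
def emit (s : String) (pos : Int) : List String :=
  match PySem.Str.pyGet? s pos with
  | some c => if paChars.contains c then [String.ofList [c]] else []
  | none => []

-- _columns from Source B; Python's seqs[:mid] / seqs[mid:] with 0 ≤ mid are take/drop
-- (PySem.List.slice_to_natCast / slice_from_natCast)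
def pvColumns (seqs : List String) (match_pos : List Int) : List (List String) :=
  match h : seqs with
  | [] => match_pos.map (fun _ => ([] : List String))
  | [s] => match_pos.map (fun p => emit s p)
  | _ :: _ :: _ =>
    let mid := seqs.length / 2
    let left := pvColumns (seqs.take mid) match_pos
    let right := pvColumns (seqs.drop mid) match_pos
    List.zipWith (fun l r => l ++ r) left right
termination_by seqs.length
decreasing_by
  · subst h; simp [List.length_take]; omega
  · subst h; simp [List.length_drop]; omega

def match_emissions_alt (seqdict : List (String × String)) (match_pos : List Int) : List (List String) :=
  if seqdict = [] then []
  else pvColumns (seqdict.map (·.2)) match_pos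

-- ===== PRECONDITION & SPEC =====
-- Pre_ excludes exactly the inputs on which Python A raises IndexError: some sequence value
-- shorter than a requested (possibly negative) position.
def Pre_match_emissions (seqdict : List (String × String)) (match_pos : List Int) : Prop :=
  ∀ p ∈ seqdict, ∀ pos ∈ match_pos, PySem.Raise.InRange p.2.toList.length pos
instance (seqdict : List (String × String)) (match_pos : List Int) : Decidable (Pre_match_emissions seqdict match_pos) := by unfold Pre_match_emissions; infer_instance

def pvWitness_match_emissions : (List (String × String)) × List Int :=
  ([("s1", "AC-Z"), ("s2", "GG-A")], [0, 3, -1])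

def Spec_match_emissions (seqdict : List (String × String)) (match_pos : List Int) (out : List (List String)) : Prop := out = match_emissions_alt seqdict match_pos
instance (seqdict : List (String × String)) (match_pos : List Int) (out : List (List String)) : Decidable (Spec_match_emissions seqdict match_pos out) := by unfold Spec_match_emissions; infer_instance

-- ===== CLAIM (what is proved, stated in full; the proofs are below) =====
def Claim_equal_match_emissions : Prop := ∀ (seqdict : List (String × String)) (match_pos : List Int), Dom_match_emissions seqdict match_pos → Pre_match_emissions seqdict match_pos → Spec_match_emissions seqdict match_pos (match_emissions seqdict match_pos)

-- ===== LEMMAS AND PROOFS =====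
-- one full column: the residues of seq[pos] over all sequences that lie in pa
def colEmit (seqs : List String) (pos : Int) : List String :=
  seqs.filterMap (fun s =>
    match PySem.Str.pyGet? s pos with
    | some c => if paChars.contains c then some (String.ofList [c]) else none
    | none => none)

theorem colEmit_nil (pos : Int) : colEmit [] pos = [] := rfl

theorem colEmit_cons (s : String) (seqs : List String) (pos : Int) :
    colEmit (s :: seqs) pos = emit s pos ++ colEmit seqs pos := by
  cases h : PySem.Str.pyGet? s pos with
  | none => (simp [colEmit, emit, List.filterMap_cons, PySem.Str.pyGet?] at h ⊢; simp [h])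
  | some c =>
    simp only [colEmit, emit, List.filterMap_cons, PySem.Str.pyGet?] at h ⊢
    rw [h]
    by_cases hm : c ∈ paChars <;> simp [hm]

theorem colEmit_append (a b : List String) (pos : Int) :
    colEmit (a ++ b) pos = colEmit a pos ++ colEmit b pos := by
  simp [colEmit, List.filterMap_append]

theorem zipWith_map_map {α β : Type} (f g : α → β) (h : β → β → β) (l : List α) :
    List.zipWith h (l.map f) (l.map g) = l.map (fun x => h (f x) (g x)) := by
  induction l with
  | nil => rfl
  | cons a t ih => simp [ih]

-- B's recursion computes exactly the per-position columns
theorem pvColumns_eq (seqs : List String) (mp : List Int) :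
    pvColumns seqs mp = mp.map (fun p => colEmit seqs p) := by
  induction seqs using pvColumns.induct mp with
  | case1 => simp [pvColumns, colEmit_nil]
  | case2 s =>
    simp only [pvColumns]
    apply List.map_congr_left
    intro p _
    rw [colEmit_cons, colEmit_nil, List.append_nil]
  | case3 a b t mid left right ihl ihr =>
    have ihr' : pvColumns (List.drop ((a :: b :: t).length / 2) (a :: b :: t)) mp
        = mp.map (fun p => colEmit (List.drop ((a :: b :: t).length / 2) (a :: b :: t)) p) := ihr
    have ihl' : pvColumns (List.take ((a :: b :: t).length / 2) (a :: b :: t)) mp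
        = mp.map (fun p => colEmit (List.take ((a :: b :: t).length / 2) (a :: b :: t)) p) := ihl
    rw [pvColumns]
    simp only [ihl', ihr', zipWith_map_map]
    apply List.map_congr_left
    intro p _
    rw [← colEmit_append, List.take_append_drop]

theorem getD_append_cons {α : Type} (pre suf : List α) (x d : α) :
    (pre ++ x :: suf).getD pre.length d = x := by
  simp [List.getD]

theorem set_append_cons {α : Type} (pre suf : List α) (x v : α) :
    (pre ++ x :: suf).set pre.length v = pre ++ v :: suf := by
  induction pre with
  | nil => rfl
  | cons a t ih => simp [ih]

theorem zipWith_map_left_self {α β : Type} (f : β → α → β) (h : α → β) (l : List α) :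
    List.zipWith f (l.map h) l = l.map (fun x => f (h x) x) := by
  induction l with
  | nil => rfl
  | cons a t ih => simp [ih]

def stepA (i : Int) (s : String) (em : List (List String)) (jpos : Int × Int) : List (List String) :=
  let em := if i = 0 then em ++ [[]] else em
  match PySem.Str.pyGet? s jpos.2 with
  | some c =>
      if paChars.contains c then
        PySem.List.pySetD em jpos.1 (PySem.List.pyGetD em jpos.1 [] ++ [String.ofList [c]])
      else em
  | none => em

theorem zipWith_append_nil (cols : List (List String)) (mp : List Int)
    (h : cols.length = mp.length) :
    List.zipWith (fun (col : List String) (_ : Int) => col ++ ([] : List String)) cols mp = cols := by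
  induction cols generalizing mp with
  | nil => simp
  | cons c t ih =>
    cases mp with
    | nil => simp at h
    | cons p mt => simp_all

theorem zip_comp (f g : List String → Int → List String) (cols : List (List String)) (mp : List Int) :
    List.zipWith f (List.zipWith g cols mp) mp = List.zipWith (fun c p => f (g c p) p) cols mp := by
  induction cols generalizing mp with
  | nil => simp
  | cons c t ih =>
    cases mp with
    | nil => simp
    | cons p mt => simp [ih]

theorem rowA0 (mp : List Int) (s : String) (em : List (List String)) :
    (PySem.List.enumerate mp (em.length : Int)).foldl (stepA 0 s) em
      = em ++ mp.map (emit s) := by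
  induction mp generalizing em with
  | nil => simp
  | cons pos mt ih =>
    rw [PySem.List.enumerate_cons, List.foldl_cons]
    have hstep : stepA 0 s em ((em.length : Int), pos) = em ++ [emit s pos] := by
      simp only [stepA, emit]
      cases h : PySem.Str.pyGet? s pos with
      | none => rfl
      | some c =>
        by_cases hc : paChars.contains c
        · simp only [hc, if_pos]
          rw [PySem.List.pySetD_natCast, PySem.List.pyGetD_natCast]
          rw [getD_append_cons em [] ([] : List String), set_append_cons em [] ([] : List String)]
          rfl
        · simp at hc; simp [hc]
    rw [hstep]
    have hlen : ((em.length : Int) + 1) = (((em ++ [emit s pos]).length : Nat) : Int) := by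
      simp
    rw [hlen, ih (em ++ [emit s pos])]
    simp

theorem rowA1 (i : Int) (hi : i ≠ 0) (s : String) (mp : List Int)
    (pre cols : List (List String)) (h : cols.length = mp.length) :
    (PySem.List.enumerate mp (pre.length : Int)).foldl (stepA i s) (pre ++ cols)
      = pre ++ List.zipWith (fun col pos => col ++ emit s pos) cols mp := by
  induction mp generalizing pre cols with
  | nil =>
    cases cols with
    | nil => simp
    | cons c t => simp at h
  | cons pos mt ih =>
    cases cols with
    | nil => simp at h
    | cons col ct =>
      rw [PySem.List.enumerate_cons, List.foldl_cons]
      have hstep : stepA i s (pre ++ col :: ct) ((pre.length : Int), pos)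
          = pre ++ (col ++ emit s pos) :: ct := by
        simp only [stepA, emit, if_neg hi]
        cases hg : PySem.Str.pyGet? s pos with
        | none => simp
        | some c =>
          by_cases hc : paChars.contains c
          · simp only [hc, if_pos]
            rw [PySem.List.pySetD_natCast, PySem.List.pyGetD_natCast]
            rw [getD_append_cons pre ct col, set_append_cons pre ct col]
          · simp at hc; simp [hc]
      rw [hstep]
      have hre : pre ++ (col ++ emit s pos) :: ct = (pre ++ [col ++ emit s pos]) ++ ct := by
        simp
      have hlen : ((pre.length : Int) + 1) = (((pre ++ [col ++ emit s pos]).length : Nat) : Int) := by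
        simp
      rw [hre, hlen, ih (pre ++ [col ++ emit s pos]) ct (by simpa using h)]
      simp

theorem outerA (seqs : List String) (mp : List Int) (n : Int) (hn : 1 ≤ n)
    (cols : List (List String)) (h : cols.length = mp.length) :
    (PySem.List.enumerate seqs n).foldl
      (fun em iseq => (PySem.List.enumerate mp).foldl (stepA iseq.1 iseq.2) em) cols
      = List.zipWith (fun col pos => col ++ colEmit seqs pos) cols mp := by
  induction seqs generalizing n cols with
  | nil =>
    simp only [PySem.List.enumerate, List.foldl_nil]
    simp only [colEmit_nil]
    exact (zipWith_append_nil cols mp h).symm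
  | cons s rest ih =>
    rw [PySem.List.enumerate_cons, List.foldl_cons]
    have h0 : (PySem.List.enumerate mp).foldl (stepA n s) cols
        = List.zipWith (fun col pos => col ++ emit s pos) cols mp := by
      have := rowA1 n (by omega) s mp [] cols h
      simpa using this
    rw [h0]
    rw [ih (n + 1) (by omega) _ (by simp [List.length_zipWith, h])]
    rw [zip_comp]
    congr 1
    funext c p
    rw [colEmit_cons, List.append_assoc]

-- ===== VERDICT (by name: the statement is the Claim_ definition above) =====
theorem match_emissions_spec : Claim_equal_match_emissions := by
  intro seqdict match_pos _ _
  unfold Spec_match_emissions match_emissions match_emissions_alt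
  cases seqdict with
  | nil => simp
  | cons q rest =>
    simp only [if_neg (List.cons_ne_nil q rest), List.map_cons]
    rw [PySem.List.enumerate_cons, List.foldl_cons]
    have h0 : (PySem.List.enumerate match_pos).foldl (stepA 0 q.2) ([] : List (List String))
        = match_pos.map (emit q.2) := by
      have := rowA0 match_pos q.2 []
      simpa using this
    show (PySem.List.enumerate (rest.map (·.2)) (0 + 1)).foldl
        (fun em iseq => (PySem.List.enumerate match_pos).foldl (stepA iseq.1 iseq.2) em)
        ((PySem.List.enumerate match_pos).foldl (stepA 0 q.2) []) = _
    rw [h0, outerA (rest.map (·.2)) match_pos (0 + 1) (by omega) _ (by simp)]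
    rw [zipWith_map_left_self]
    rw [pvColumns_eq]
    apply List.map_congr_left
    intro pos _
    rw [colEmit_cons]
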